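-- pv_equiv track=rewrite | github.com/Zheilon/scrapping_for_lawy | utils.py | transformTypeTxt
-- ===== SOURCE A (Python) =====
-- def transformTypeTxt(name: str):
--     lowerName = ""
--     enghWhiteSpaces = name.strip()
--     for chars in enghWhiteSpaces:
--         if chars != ' ':
--             lowerName += chars.lower()
--         elif chars == ' ':
--             lowerName += '_'
--
--     second = ""
--     for chars in lowerName:
--         if chars != ',':
--             second += chars
--
--     three = ""
--     for chars in second:
--         if chars != ';':
--             three += chars
--
--     four = ""
--     for chars in three:
--         if chars != ':':
--             four += chars
--
--     five = ""
--     for chars in four: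
--         if chars != '.':
--             five += chars
--
--     return five + ".txt"
-- ===== SOURCE B (Python) =====
-- _TABLE = str.maketrans({' ': '_', ',': None, ';': None, ':': None, '.': None})
--
-- def transformTypeTxt(name: str):
--     return name.strip().lower().translate(_TABLE) + ".txt"
-- ===== Notes on version B (the rewrite author's own statement) =====
-- stated objective: idiomatic
-- what changed: Replaces five sequential character-accumulation loops (and their repeated string re-concatenation) with a single table-driven translate pass over the stripped, lowercased string before the extension is appended.
import Mathlib
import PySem

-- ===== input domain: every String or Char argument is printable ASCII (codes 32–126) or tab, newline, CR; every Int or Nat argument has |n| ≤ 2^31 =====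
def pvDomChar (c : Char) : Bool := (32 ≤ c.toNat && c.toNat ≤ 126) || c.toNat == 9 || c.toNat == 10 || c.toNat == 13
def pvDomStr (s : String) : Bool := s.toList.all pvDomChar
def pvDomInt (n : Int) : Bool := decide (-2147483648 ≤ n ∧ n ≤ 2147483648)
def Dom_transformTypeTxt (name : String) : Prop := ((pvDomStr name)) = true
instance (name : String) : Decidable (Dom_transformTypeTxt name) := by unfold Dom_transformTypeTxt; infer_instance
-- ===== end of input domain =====

-- B replaces A's five sequential accumulation loops by one table-driven pass
-- (strip, lower, translate, append ".txt"): idiomatic, same result.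

-- ===== PORT A =====
def transformTypeTxt (name : String) : String :=
  let enghWhiteSpaces := (PySem.Str.strip name).toList
  let lowerName := enghWhiteSpaces.foldl
    (fun acc c => if c ≠ ' ' then acc ++ [PySem.Chars.lowerChar c] else acc ++ ['_']) []
  let second := lowerName.foldl (fun acc c => if c ≠ ',' then acc ++ [c] else acc) []
  let three := second.foldl (fun acc c => if c ≠ ';' then acc ++ [c] else acc) []
  let four := three.foldl (fun acc c => if c ≠ ':' then acc ++ [c] else acc) []
  let five := four.foldl (fun acc c => if c ≠ '.' then acc ++ [c] else acc) []
  String.mk (five ++ ".txt".toList)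

-- ===== PORT B =====
-- the translation table of Source B: ' ' ↦ '_'; ',' ';' ':' '.' deleted; otherwise identity
def pvTxtTable (c : Char) : Option Char :=
  if c = ' ' then some '_'
  else if c = ',' ∨ c = ';' ∨ c = ':' ∨ c = '.' then none
  else some c

def transformTypeTxt_alt (name : String) : String :=
  String.mk ((PySem.Chars.lower (PySem.Str.strip name).toList).filterMap pvTxtTable ++ ".txt".toList)

-- ===== PRECONDITION & SPEC =====
def Spec_transformTypeTxt (name : String) (out : String) : Prop := out = transformTypeTxt_alt name
instance (name : String) (out : String) : Decidable (Spec_transformTypeTxt name out) := by unfold Spec_transformTypeTxt; infer_instance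

-- ===== CLAIM (what is proved, stated in full; the proofs are below) =====
def Claim_equal_transformTypeTxt : Prop := ∀ (name : String), Dom_transformTypeTxt name → Spec_transformTypeTxt name (transformTypeTxt name)

-- ===== LEMMAS AND PROOFS =====

-- A's first loop (append lower(c), or '_' for a space) is a map.
theorem pv_stage1 (l : List Char) (acc : List Char) :
    l.foldl (fun acc c => if c ≠ ' ' then acc ++ [PySem.Chars.lowerChar c] else acc ++ ['_']) acc
      = acc ++ l.map (fun c => if c ≠ ' ' then PySem.Chars.lowerChar c else '_') := by
  induction l generalizing acc with
  | nil => simp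
  | cons c t ih =>
    rw [List.foldl_cons]
    by_cases h : c = ' '
    · rw [if_neg (by simp [h]), ih]; simp [h]
    · rw [if_pos (by simp [h]), ih]; simp [h]

theorem pv_lower_ne_space (c : Char) (h : c ≠ ' ') : PySem.Chars.lowerChar c ≠ ' ' := by
  unfold PySem.Chars.lowerChar
  split
  · rename_i hu
    simp only [PySem.Chars.isupper, Bool.and_eq_true, decide_eq_true_eq] at hu
    have h1 : ('A' : Char).toNat ≤ c.toNat := Fin.mk_le_mk.mp hu.1
    have h2 : c.toNat ≤ ('Z' : Char).toNat := Fin.mk_le_mk.mp hu.2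
    have ha : ('A' : Char).toNat = 65 := rfl
    have hz : ('Z' : Char).toNat = 90 := rfl
    have hs : (' ' : Char).toNat = 32 := rfl
    intro he
    have h3 := congrArg Char.toNat he
    rw [Char.toNat_ofNat, if_pos (Or.inl (by omega))] at h3
    omega
  · exact h

theorem pv_stages_eq (l : List Char) :
    ((((l.map (fun c => if c ≠ ' ' then PySem.Chars.lowerChar c else '_')).filter
        (fun c => decide (c ≠ ','))).filter (fun c => decide (c ≠ ';'))).filter
        (fun c => decide (c ≠ ':'))).filter (fun c => decide (c ≠ '.'))
      = (PySem.Chars.lower l).filterMap pvTxtTable := by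
  induction l with
  | nil => rfl
  | cons c t ih =>
    have hcons : PySem.Chars.lower (c :: t) = PySem.Chars.lowerChar c :: PySem.Chars.lower t := rfl
    rw [List.map_cons, hcons, List.filterMap_cons]
    by_cases hsp : c = ' '
    · subst hsp
      have h1 : PySem.Chars.lowerChar ' ' = ' ' := rfl
      rw [h1]
      have h2 : pvTxtTable ' ' = some '_' := rfl
      rw [h2, if_neg (by simp)]
      rw [List.filter_cons_of_pos (by decide), List.filter_cons_of_pos (by decide),
          List.filter_cons_of_pos (by decide), List.filter_cons_of_pos (by decide), ih]
    · rw [if_pos (by simpa using hsp)]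
      have hns := pv_lower_ne_space c hsp
      by_cases h1 : PySem.Chars.lowerChar c = ','
      · rw [List.filter_cons_of_neg (by simp [h1])]
        rw [show pvTxtTable (PySem.Chars.lowerChar c) = none by simp [pvTxtTable, h1], ih]
      by_cases h2 : PySem.Chars.lowerChar c = ';'
      · rw [List.filter_cons_of_pos (by simp [h1]), List.filter_cons_of_neg (by simp [h2])]
        rw [show pvTxtTable (PySem.Chars.lowerChar c) = none by simp [pvTxtTable, h2], ih]
      by_cases h3 : PySem.Chars.lowerChar c = ':'
      · rw [List.filter_cons_of_pos (by simp [h1]), List.filter_cons_of_pos (by simp [h2]),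
            List.filter_cons_of_neg (by simp [h3])]
        rw [show pvTxtTable (PySem.Chars.lowerChar c) = none by simp [pvTxtTable, h3], ih]
      by_cases h4 : PySem.Chars.lowerChar c = '.'
      · rw [List.filter_cons_of_pos (by simp [h1]), List.filter_cons_of_pos (by simp [h2]),
            List.filter_cons_of_pos (by simp [h3]), List.filter_cons_of_neg (by simp [h4])]
        rw [show pvTxtTable (PySem.Chars.lowerChar c) = none by simp [pvTxtTable, h4], ih]
      · rw [List.filter_cons_of_pos (by simp [h1]), List.filter_cons_of_pos (by simp [h2]),
            List.filter_cons_of_pos (by simp [h3]), List.filter_cons_of_pos (by simp [h4])]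
        rw [show pvTxtTable (PySem.Chars.lowerChar c) = some (PySem.Chars.lowerChar c) by
              simp [pvTxtTable, h1, h2, h3, h4, hns], ih]

-- ===== VERDICT (by name: the statement is the Claim_ definition above) =====
theorem transformTypeTxt_spec : Claim_equal_transformTypeTxt := by
  intro name _
  unfold Spec_transformTypeTxt transformTypeTxt transformTypeTxt_alt
  dsimp only
  rw [pv_stage1, PySem.List.foldl_append_ite_eq_filter, PySem.List.foldl_append_ite_eq_filter,
    PySem.List.foldl_append_ite_eq_filter, PySem.List.foldl_append_ite_eq_filter]
  simp only [List.nil_append]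
  rw [pv_stages_eq]
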